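-- pv_equiv track=rewrite | github.com/Vineyardcode/voynich_slop | scripts/phase73_abbreviation_model.py | syllabify_latin
-- ===== SOURCE A (Python) =====
-- VOWELS = set('aeiou')
--
-- CONSONANTS = set('bcdfghjklmnpqrstvwxyz')
--
-- def syllabify_latin(word):
--     """Simple Latin syllabification (approximate).
--     Rules: split before consonant+vowel sequences.
--     This is an approximation — real Latin syllabification has more rules."""
--     if len(word) <= 2:
--         return [word]
--
--     syllables = []
--     current = word[0]
--     for i in range(1, len(word)):
--         ch = word[i]
--         prev = word[i-1]
--         # Split before a consonant that precedes a vowel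
--         if (ch in CONSONANTS and i + 1 < len(word) and word[i+1] in VOWELS
--             and len(current) >= 1 and current[-1] in VOWELS):
--             syllables.append(current)
--             current = ch
--         else:
--             current += ch
--     if current:
--         syllables.append(current)
--     return syllables
-- ===== SOURCE B (Python) =====
-- VOWELS = set('aeiou')
--
-- CONSONANTS = set('bcdfghjklmnpqrstvwxyz')
--
-- def syllabify_latin(word):
--     """Boundary-then-slice syllabification: collect the split positions first,
--     then cut the word at them."""
--     if len(word) <= 2:
--         return [word]
--     cuts = [i for i in range(1, len(word) - 1)
--             if word[i] in CONSONANTS and word[i + 1] in VOWELS and word[i - 1] in VOWELS]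
--     bounds = [0] + cuts + [len(word)]
--     return [word[a:b] for a, b in zip(bounds, bounds[1:])]
-- ===== Notes on version B (the rewrite author's own statement) =====
-- stated objective: alternative
-- what changed: A builds syllables with a running accumulator grown one character at a time inside the scan; B first collects the cut positions (vowel-consonant-vowel boundaries) with a filter over the index range and then slices the word between consecutive boundaries.
import Mathlib
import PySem

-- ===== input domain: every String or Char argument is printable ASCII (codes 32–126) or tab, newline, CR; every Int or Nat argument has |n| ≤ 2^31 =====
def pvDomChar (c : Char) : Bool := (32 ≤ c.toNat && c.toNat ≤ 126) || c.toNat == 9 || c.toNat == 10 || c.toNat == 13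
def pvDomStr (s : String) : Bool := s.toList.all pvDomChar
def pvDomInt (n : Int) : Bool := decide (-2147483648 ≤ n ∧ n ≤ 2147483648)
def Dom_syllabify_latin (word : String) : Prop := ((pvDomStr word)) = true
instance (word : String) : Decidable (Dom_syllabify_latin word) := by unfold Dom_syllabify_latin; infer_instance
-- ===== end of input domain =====

-- B computes the split boundaries first and slices the word at them, instead of A's running-accumulator loop; objective: alternative decomposition (same cost).

-- module constants VOWELS / CONSONANTS (membership tests)
def pvIsVowel (c : Char) : Bool := "aeiou".toList.contains c
def pvIsCons (c : Char) : Bool := "bcdfghjklmnpqrstvwxyz".toList.contains c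

-- ===== PORT A =====
-- loop body of A: state = (syllables, current), i the loop index
def pvStepA (l : List Char) (n : Int) (st : List (List Char) × List Char) (i : Int) :
    List (List Char) × List Char :=
  let ch := PySem.List.pyGetD l i ' '
  if pvIsCons ch && decide (i + 1 < n) && pvIsVowel (PySem.List.pyGetD l (i + 1) ' ')
      && decide (1 ≤ st.2.length) && pvIsVowel (PySem.List.pyGetD st.2 (-1) ' ')
  then (st.1 ++ [st.2], [ch])
  else (st.1, st.2 ++ [ch])

def syllabify_latin (word : String) : List String :=
  let l := word.toList
  if l.length ≤ 2 then [word]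
  else
    let n : Int := l.length
    let fin := (PySem.List.pyRange 1 n 1).foldl (pvStepA l n) ([], [PySem.List.pyGetD l 0 ' '])
    (if fin.2.isEmpty then fin.1 else fin.1 ++ [fin.2]).map (fun s => String.ofList s)

-- ===== PORT B =====
-- B's cut condition at index i: word[i] consonant, word[i+1] vowel, word[i-1] vowel
def pvPredB (l : List Char) (i : Int) : Bool :=
  pvIsCons (PySem.List.pyGetD l i ' ') && pvIsVowel (PySem.List.pyGetD l (i + 1) ' ')
    && pvIsVowel (PySem.List.pyGetD l (i - 1) ' ')

def syllabify_latin_alt (word : String) : List String :=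
  let l := word.toList
  if l.length ≤ 2 then [word]
  else
    let n : Int := l.length
    let cuts := (PySem.List.pyRange 1 (n - 1) 1).filter (pvPredB l)
    let bounds := 0 :: (cuts ++ [n])
    (bounds.zip bounds.tail).map (fun p => String.ofList (PySem.List.slice l (some p.1) (some p.2)))

-- ===== PRECONDITION & SPEC =====
def Spec_syllabify_latin (word : String) (out : List String) : Prop := out = syllabify_latin_alt word
instance (word : String) (out : List String) : Decidable (Spec_syllabify_latin word out) := by unfold Spec_syllabify_latin; infer_instance

-- ===== CLAIM (what is proved, stated in full; the proofs are below) =====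
def Claim_equal_syllabify_latin : Prop := ∀ (word : String), Dom_syllabify_latin word → Spec_syllabify_latin word (syllabify_latin word)

-- ===== LEMMAS AND PROOFS =====

-- pieces of a boundary list (what B's zip-map computes, without the String wrapping)
def pvPieces (l : List Char) (bs : List Int) : List (List Char) :=
  (bs.zip bs.tail).map (fun p => PySem.List.slice l (some p.1) (some p.2))

-- last boundary so far
def pvLast (c : List Int) : Int := (0 :: c).getLast (by simp)

lemma pvLast_append (c : List Int) (x : Int) : pvLast (c ++ [x]) = x := by
  simp [pvLast]

lemma pvLast_mem (c : List Int) : pvLast c = 0 ∨ pvLast c ∈ c := by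
  have h : pvLast c ∈ 0 :: c := List.getLast_mem (by simp)
  exact List.mem_cons.mp h

lemma pvPieces_append (l : List Char) (bs : List Int) (x : Int) (h : bs ≠ []) :
    pvPieces l (bs ++ [x]) = pvPieces l bs ++ [PySem.List.slice l (some (bs.getLast h)) (some x)] := by
  induction bs with
  | nil => simp at h
  | cons b bs ih =>
    cases bs with
    | nil => simp [pvPieces]
    | cons b' bs' =>
      have := ih (by simp)
      simp only [pvPieces, List.cons_append, List.tail_cons, List.zip_cons_cons, List.map_cons] at this ⊢
      rw [this]
      simp [List.getLast]

lemma pv_take_drop_append (l : List Char) (a k : Nat) (h : a + k < l.length) :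
    (l.drop a).take k ++ [l[a + k]] = (l.drop a).take (k + 1) := by
  rw [List.take_succ]
  have h1 : k < (l.drop a).length := by simp; omega
  have h2 : (l.drop a)[k]? = some l[a + k] := by
    rw [List.getElem?_eq_getElem h1]
    congr 1
    rw [List.getElem_drop]
  rw [h2]
  simp

lemma pv_getD_cast (l : List Char) (i : Nat) (hi : i < l.length) :
    PySem.List.pyGetD l (i : Int) ' ' = l[i] := by
  simp [List.getD_eq_getElem?_getD, List.getElem?_eq_getElem hi]

lemma pvLast_filter_bound (l : List Char) (i : Int) (h : 1 ≤ i) :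
    ∃ a' : Nat, pvLast ((PySem.List.pyRange 1 i 1).filter (pvPredB l)) = (a' : Int) ∧ ((a' : Int)) < i := by
  rcases pvLast_mem ((PySem.List.pyRange 1 i 1).filter (pvPredB l)) with h0 | hm
  · exact ⟨0, by simp [h0], by omega⟩
  · have hmem := (List.mem_filter.mp hm).1
    have hb := (PySem.List.mem_pyRange_one).mp hmem
    refine ⟨(pvLast ((PySem.List.pyRange 1 i 1).filter (pvPredB l))).toNat, ?_, ?_⟩
    · rw [Int.toNat_of_nonneg (by omega)]
    · rw [Int.toNat_of_nonneg (by omega)]; omega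

lemma pv_cur_extend (l : List Char) (a' i : Nat) (ha : a' < i) (hi : i < l.length) :
    PySem.List.slice l (some ((a' : Int))) (some ((i : Int))) ++ [PySem.List.pyGetD l (i : Int) ' ']
      = PySem.List.slice l (some ((a' : Int))) (some (((i : Int)) + 1)) := by
  have hc : ((i : Int)) + 1 = (((i + 1 : Nat) : Int)) := by push_cast; ring
  rw [hc, PySem.List.slice_natCast, PySem.List.slice_natCast, pv_getD_cast l i hi]
  have h2 := pv_take_drop_append l a' (i - a') (by omega)
  simp only [show a' + (i - a') = i from by omega] at h2
  rw [h2]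
  congr 1
  omega

lemma pv_slice_singleton (l : List Char) (i : Nat) (hi : i < l.length) :
    PySem.List.slice l (some ((i : Int))) (some (((i : Int)) + 1)) = [l[i]] := by
  have hc : ((i : Int)) + 1 = (((i + 1 : Nat) : Int)) := by push_cast; ring
  have h2 := pv_take_drop_append l i 0 (by omega)
  simp only [Nat.add_zero, List.take_zero, List.nil_append, Nat.zero_add] at h2
  rw [hc, PySem.List.slice_natCast, show i + 1 - i = 1 from by omega]
  exact h2.symm

-- main loop invariant: after processing indices 1..i-1 the state is (pieces cut so far, current slice)
lemma pv_inv (l : List Char) (hn : 3 ≤ l.length) :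
    ∀ i : Nat, 1 ≤ i → i ≤ l.length - 1 →
    (PySem.List.pyRange 1 (i : Int) 1).foldl (pvStepA l (l.length : Int))
        ([], [PySem.List.pyGetD l 0 ' ']) =
      (pvPieces l (0 :: (PySem.List.pyRange 1 (i : Int) 1).filter (pvPredB l)),
       PySem.List.slice l (some (pvLast ((PySem.List.pyRange 1 (i : Int) 1).filter (pvPredB l)))) (some (i : Int))) := by
  intro i
  induction i with
  | zero => intro h1 _; omega
  | succ i ih =>
    intro _ h2
    by_cases hi0 : i = 0
    · subst hi0
      rw [show (((0 : Nat) + 1 : Nat) : Int) = 1 by norm_num, PySem.List.pyRange_one_eq_nil (by norm_num)]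
      obtain ⟨x, l', rfl⟩ : ∃ x l', l = x :: l' := by
        cases l with
        | nil => simp at hn
        | cons x l' => exact ⟨x, l', rfl⟩
      simp [pvPieces, pvLast, PySem.List.slice_to, PySem.List.pyGetD_zero_cons]
    · have h1' : 1 ≤ i := by omega
      have IH := ih h1' (by omega)
      have hcast : (((i + 1 : Nat)) : Int) = ((i : Int)) + 1 := by push_cast; ring
      rw [hcast, PySem.List.pyRange_one_succ_right (by omega : (1:Int) ≤ (i : Int)),
        List.foldl_append, List.filter_append, IH]
      obtain ⟨a', ha', hai⟩ := pvLast_filter_bound l (i : Int) (by omega)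
      have hai' : a' < i := by exact_mod_cast hai
      have hilen : i < l.length := by omega
      set c := (PySem.List.pyRange 1 (i : Int) 1).filter (pvPredB l) with hc
      set cur := PySem.List.slice l (some (pvLast c)) (some (i : Int)) with hcurdef
      have hcur : cur = (l.drop a').take (i - a') := by
        rw [hcurdef, ha', PySem.List.slice_natCast]
      have hlen : cur.length = i - a' := by
        rw [hcur]; simp; omega
      have hne : cur ≠ [] := by
        intro h; rw [h] at hlen; simp at hlen; omega
      have hb1 : i - 1 < l.length := by omega
      have hlast : PySem.List.pyGetD cur (-1) ' ' = PySem.List.pyGetD l ((i : Int) - 1) ' ' := by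
        have hsplit2 := pv_take_drop_append l a' (i - 1 - a') (by omega)
        simp only [show a' + (i - 1 - a') = i - 1 from by omega] at hsplit2
        have hcur2 : cur = List.take (i - 1 - a') (List.drop a' l) ++ [l[i - 1]'hb1] := by
          rw [hcur, hsplit2]
          congr 1
          omega
        have h4 : cur.getLast? = some (l[i - 1]'hb1) := by
          rw [hcur2]; simp
        rw [List.getLast?_eq_getLast hne] at h4
        rw [PySem.List.pyGetD_neg_one cur ' ' hne, Option.some.inj h4,
          show ((i : Int)) - 1 = (((i - 1 : Nat)) : Int) by omega, pv_getD_cast l (i-1) hb1]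
      have hd1 : decide (((i : Int)) + 1 < ((l.length : Int))) = true := by
        simp; omega
      have hd2 : decide (1 ≤ cur.length) = true := by
        simp [hlen]; omega
      have hcond : (pvIsCons (PySem.List.pyGetD l (i : Int) ' ') && decide (((i : Int)) + 1 < ((l.length : Int)))
          && pvIsVowel (PySem.List.pyGetD l (((i : Int)) + 1) ' ') && decide (1 ≤ cur.length)
          && pvIsVowel (PySem.List.pyGetD cur (-1) ' ')) = pvPredB l (i : Int) := by
        rw [hd1, hd2, hlast, pvPredB]
        cases pvIsCons (PySem.List.pyGetD l (i : Int) ' ') <;>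
          cases pvIsVowel (PySem.List.pyGetD l (((i : Int)) + 1) ' ') <;>
          cases pvIsVowel (PySem.List.pyGetD l (((i : Int)) - 1) ' ') <;> simp
      simp only [List.foldl_cons, List.foldl_nil, pvStepA]
      rw [hcond]
      by_cases hp : pvPredB l (i : Int) = true
      · rw [if_pos hp]
        simp only [List.filter_singleton, hp, cond_true, Prod.mk.injEq]
        refine ⟨?_, ?_⟩
        · rw [show (0 : Int) :: (c ++ [(i : Int)]) = ((0 :: c) ++ [(i : Int)]) by simp,
            pvPieces_append l (0 :: c) (i : Int) (by simp)]
          rfl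
        · rw [pvLast_append, pv_slice_singleton l i hilen, pv_getD_cast l i hilen]
      · rw [if_neg hp]
        have hp' : pvPredB l (i : Int) = false := by simpa using hp
        simp only [List.filter_singleton, hp', cond_false, List.append_nil]
        rw [hcurdef, ha', pv_cur_extend l a' i hai' hilen]

-- B's zip-map written through pvPieces
lemma pv_alt_pieces (l : List Char) (c : List Int) (n : Int) :
    (((0 :: (c ++ [n])).zip (c ++ [n])).map (fun p => String.ofList (PySem.List.slice l (some p.1) (some p.2))))
      = (pvPieces l (0 :: (c ++ [n]))).map String.ofList := by
  simp [pvPieces, List.map_map, Function.comp]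

theorem syllabify_latin_spec : Claim_equal_syllabify_latin := by
  unfold Claim_equal_syllabify_latin
  intro word _
  unfold Spec_syllabify_latin syllabify_latin syllabify_latin_alt
  by_cases h : word.toList.length ≤ 2
  · have h2 : word.length ≤ 2 := by simpa using h
    simp [h2]
  · simp only [if_neg h]
    have hn : 3 ≤ word.toList.length := by omega
    set l := word.toList with hl
    set j := l.length - 1 with hj
    have hm1 : 1 ≤ j := by omega
    have hsplit : PySem.List.pyRange 1 (l.length : Int) 1
        = PySem.List.pyRange 1 ((j : Nat) : Int) 1 ++ [((j : Nat) : Int)] := by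
      rw [show ((l.length : Int)) = ((j : Nat) : Int) + 1 by omega,
        PySem.List.pyRange_one_succ_right (by omega)]
    rw [hsplit, List.foldl_append, pv_inv l hn j hm1 (by omega)]
    obtain ⟨a', ha', hai⟩ := pvLast_filter_bound l (j : Int) (by omega)
    have hai' : a' < j := by exact_mod_cast hai
    have hjlen : j < l.length := by omega
    set c := (PySem.List.pyRange 1 (j : Int) 1).filter (pvPredB l) with hc
    have hd1 : decide (((j : Int)) + 1 < ((l.length : Int))) = false := by
      simp; omega
    simp only [List.foldl_cons, List.foldl_nil, pvStepA, hd1, Bool.and_false, Bool.false_and,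
      if_neg (Bool.false_ne_true)]
    rw [ha', pv_cur_extend l a' j hai' hjlen]
    have hne2 : PySem.List.slice l (some ((a' : Int))) (some (((j : Int)) + 1)) ≠ [] := by
      rw [show ((j : Int)) + 1 = (((j + 1 : Nat)) : Int) by push_cast; ring, PySem.List.slice_natCast]
      intro hcon
      have := congrArg List.length hcon
      simp at this
      omega
    rw [if_neg (by simpa [List.isEmpty_iff] using hne2)]
    -- right-hand side
    rw [show ((l.length : Int)) - 1 = ((j : Nat) : Int) by omega]
    rw [List.tail_cons, pv_alt_pieces l c ((l.length : Int))]
    rw [show ((0 : Int)) :: (c ++ [((l.length : Int))]) = ((0 :: c) ++ [((l.length : Int))]) by simp,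
      pvPieces_append l (0 :: c) ((l.length : Int)) (by simp)]
    have hlast0 : (0 :: c).getLast (by simp) = ((a' : Int)) := ha'
    rw [hlast0, show ((l.length : Int)) = ((j : Int)) + 1 by omega]
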